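-- pv_equiv track=rewrite | github.com/ajtran303/phrase-hunter | phrasehunter/phrase.py | set_underscores
-- ===== SOURCE A (Python) =====
-- def set_underscores(phrase, init=False):
--     underscores = []
--     for word in phrase.split(' '):
--         if init is True:
--             characters = ['_' for character in word]
--         else:
--             characters = [character for character in word]
--         underscores.append(' '.join(characters))
--     return '   '.join(underscores)
-- ===== SOURCE B (Python) =====
-- def set_underscores(phrase, init=False):
--     out = []
--     at_word_start = True
--     for ch in phrase:
--         if ch == ' ':
--             out.append('   ')
--             at_word_start = True
--         else:
--             if not at_word_start:
--                 out.append(' ')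
--             out.append('_' if init is True else ch)
--             at_word_start = False
--     return ''.join(out)
-- ===== Notes on version B (the rewrite author's own statement) =====
-- stated objective: alternative
-- what changed: Replaced split-into-words + per-word join + outer join with a single left-to-right scan over the characters that emits separators driven by an at_word_start flag.
import Mathlib
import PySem

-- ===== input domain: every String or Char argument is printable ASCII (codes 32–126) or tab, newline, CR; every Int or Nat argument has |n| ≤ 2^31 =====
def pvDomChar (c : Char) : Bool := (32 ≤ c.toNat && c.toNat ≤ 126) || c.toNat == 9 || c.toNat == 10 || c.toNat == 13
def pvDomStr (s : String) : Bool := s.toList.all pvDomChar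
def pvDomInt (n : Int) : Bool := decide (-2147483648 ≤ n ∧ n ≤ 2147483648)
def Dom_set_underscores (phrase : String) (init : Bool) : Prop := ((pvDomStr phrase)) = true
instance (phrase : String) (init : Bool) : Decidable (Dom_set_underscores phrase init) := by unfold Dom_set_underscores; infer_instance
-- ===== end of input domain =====

-- B replaces A's split-into-words + per-word join + outer join by a single left-to-right scan
-- with an at_word_start flag that emits separators inline (alternative decomposition, same cost).

-- ===== PORT A =====
-- A: split phrase on ' '; per word, list its characters ('_' per character when init is True);
-- join the characters with ' '; join the words with '   '.
def set_underscores (phrase : String) (init : Bool) : String :=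
  String.ofList (PySem.Chars.join [' ', ' ', ' ']
    ((PySem.Chars.splitOn phrase.toList [' ']).foldl
      (fun acc word =>
        acc ++ [PySem.Chars.join [' ']
          (if init = true then word.map (fun _ => ['_']) else word.map (fun c => [c]))]) []))

-- ===== PORT B =====
-- B: one pass over the characters with an at_word_start flag; ''.join at the end.
def set_underscores_alt (phrase : String) (init : Bool) : String :=
  String.ofList (PySem.Chars.join []
    (phrase.toList.foldl
      (fun (p : List (List Char) × Bool) ch =>
        if ch = ' ' then (p.1 ++ [[' ', ' ', ' ']], true)
        else ((if p.2 = false then p.1 ++ [[' ']] else p.1)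
                ++ [if init = true then ['_'] else [ch]], false))
      ([], true)).1)

-- ===== PRECONDITION & SPEC =====
def Spec_set_underscores (phrase : String) (init : Bool) (out : String) : Prop := out = set_underscores_alt phrase init
instance (phrase : String) (init : Bool) (out : String) : Decidable (Spec_set_underscores phrase init out) := by unfold Spec_set_underscores; infer_instance

-- ===== CLAIM (what is proved, stated in full; the proofs are below) =====
def Claim_equal_set_underscores : Prop := ∀ (phrase : String) (init : Bool), Dom_set_underscores phrase init → Spec_set_underscores phrase init (set_underscores phrase init)

-- ===== LEMMAS AND PROOFS =====

-- plain accumulator-style specification of splitting on a single space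
def pvSplit (pre : List Char) : List Char → List (List Char)
  | [] => [pre]
  | c :: rest => if c = ' ' then pre :: pvSplit [] rest else pvSplit (pre ++ [c]) rest

-- the characters B's scan emits from suffix cs when the at_word_start flag is st
def pvBRun (init : Bool) : List Char → Bool → List Char
  | [], _ => []
  | c :: rest, st =>
    if c = ' ' then [' ', ' ', ' '] ++ pvBRun init rest true
    else (if st then [] else [' ']) ++ (if init = true then ['_'] else [c]) ++ pvBRun init rest false

-- A's per-word formatting at the character level
def pvWfmt (init : Bool) (w : List Char) : List Char :=
  PySem.Chars.join [' '] (if init = true then w.map (fun _ => ['_']) else w.map (fun c => [c]))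

theorem pvJoin_singleton (sep a : List Char) : PySem.Chars.join sep [a] = a := by
  simp [PySem.Chars.join, List.intercalate, List.intersperse]

theorem pvJoin_cons_cons (sep a b : List Char) (t : List (List Char)) :
    PySem.Chars.join sep (a :: b :: t) = a ++ sep ++ PySem.Chars.join sep (b :: t) := by
  simp [PySem.Chars.join, List.intercalate, List.intersperse]

theorem pvJoin_empty_sep (l : List (List Char)) : PySem.Chars.join [] l = l.flatten := by
  induction l with
  | nil => rfl
  | cons a t ih => cases t <;> simp_all [pvJoin_cons_cons, pvJoin_singleton]

theorem pvJoin_append_singleton (sep : List Char) (l : List (List Char)) (a : List Char) :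
    PySem.Chars.join sep (l ++ [a]) =
      (if l.isEmpty then [] else PySem.Chars.join sep l ++ sep) ++ a := by
  induction l with
  | nil => simp [PySem.Chars.join, List.intercalate, List.intersperse]
  | cons b t ih =>
    cases t with
    | nil => simp [pvJoin_cons_cons, pvJoin_singleton]
    | cons c u => simp_all [pvJoin_cons_cons]

theorem pvSplit_ne_nil (pre cs : List Char) : pvSplit pre cs ≠ [] := by
  induction cs generalizing pre with
  | nil => simp [pvSplit]
  | cons c rest ih => simp only [pvSplit]; split_ifs <;> simp [ih]

theorem pvGo_spec (fuel : Nat) (l cur : List Char) (acc : List (List Char))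
    (h : l.length < fuel) :
    PySem.Chars.splitOn.go [' '] fuel l cur acc = acc.reverse ++ pvSplit cur.reverse l := by
  induction fuel generalizing l cur acc with
  | zero => omega
  | succ fuel ih =>
    rw [PySem.Chars.splitOn.go.eq_def]
    cases l with
    | nil => simp [pvSplit]
    | cons c rest =>
      simp only [List.length_cons] at h
      by_cases hc : c = ' '
      · subst hc
        have hpre : List.isPrefixOf [' '] (' ' :: rest) = true := by
          simp [List.isPrefixOf]
        simp only [hpre]
        rw [show List.drop [' '].length (' ' :: rest) = rest from rfl,
          ih rest [] (cur.reverse :: acc) (by omega)]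
        simp [pvSplit]
      · have hpre : List.isPrefixOf [' '] (c :: rest) = false := by
          simp [List.isPrefixOf]; exact fun h' => hc h'.symm
        simp only [hpre]
        rw [if_neg (by simp), ih rest (c :: cur) acc (by omega)]
        simp [pvSplit, hc]

theorem pvWfmt_nil (init : Bool) : pvWfmt init [] = [] := by
  cases init <;> simp [pvWfmt, PySem.Chars.join, List.intercalate]

theorem pvWfmt_append (init : Bool) (pre : List Char) (c : Char) :
    pvWfmt init (pre ++ [c]) =
      pvWfmt init pre ++ (if pre.isEmpty then [] else [' '])
        ++ (if init = true then ['_'] else [c]) := by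
  have hmap : ∀ (f : Char → List Char) (w : List Char), (w.map f).isEmpty = w.isEmpty :=
    fun f w => by cases w <;> simp
  cases init <;>
    simp only [pvWfmt, List.map_append, List.map_cons, List.map_nil, Bool.false_eq_true,
      reduceIte, pvJoin_append_singleton, hmap] <;>
    split_ifs <;> simp_all [List.isEmpty_iff]

theorem pvKey (init : Bool) (cs : List Char) : ∀ pre,
    PySem.Chars.join [' ', ' ', ' '] ((pvSplit pre cs).map (pvWfmt init)) =
      pvWfmt init pre ++ pvBRun init cs pre.isEmpty := by
  induction cs with
  | nil => intro pre; simp [pvSplit, pvBRun, pvJoin_singleton]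
  | cons c rest ih =>
    intro pre
    by_cases hc : c = ' '
    · subst hc
      rw [show pvSplit pre (' ' :: rest) = pre :: pvSplit [] rest from by simp [pvSplit],
        show pvBRun init (' ' :: rest) pre.isEmpty = [' ', ' ', ' '] ++ pvBRun init rest true from by
          simp [pvBRun]]
      obtain ⟨w, ws, hw⟩ := List.exists_cons_of_ne_nil (pvSplit_ne_nil [] rest)
      rw [List.map_cons, hw, List.map_cons, pvJoin_cons_cons, ← List.map_cons, ← hw, ih []]
      simp [pvWfmt_nil]
    · simp only [pvSplit, if_neg hc, pvBRun, ih (pre ++ [c]), pvWfmt_append]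
      have : (pre ++ [c]).isEmpty = false := by simp
      rw [this]
      cases hpe : pre.isEmpty <;> simp

theorem pvFoldB (init : Bool) (cs : List Char) : ∀ (out : List (List Char)) (st : Bool),
    (cs.foldl
        (fun (p : List (List Char) × Bool) ch =>
          if ch = ' ' then (p.1 ++ [[' ', ' ', ' ']], true)
          else ((if p.2 = false then p.1 ++ [[' ']] else p.1)
                  ++ [if init = true then ['_'] else [ch]], false))
        (out, st)).1.flatten =
      out.flatten ++ pvBRun init cs st := by
  induction cs with
  | nil => intro out st; simp [pvBRun]
  | cons c rest ih =>
    intro out st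
    rw [List.foldl_cons]
    by_cases hc : c = ' '
    · subst hc
      rw [if_pos rfl, ih]
      simp [pvBRun]
    · rw [if_neg hc, ih]
      cases st <;> simp [pvBRun, hc]

theorem pvFoldA (init : Bool) (ws : List (List Char)) : ∀ acc : List (List Char),
    ws.foldl
        (fun acc word =>
          acc ++ [PySem.Chars.join [' ']
            (if init = true then word.map (fun _ => ['_']) else word.map (fun c => [c]))])
        acc = acc ++ ws.map (pvWfmt init) := by
  induction ws with
  | nil => intro acc; simp
  | cons w ws ih =>
    intro acc
    rw [List.foldl_cons, ih]
    simp [pvWfmt]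

-- ===== VERDICT (by name: the statement is the Claim_ definition above) =====
theorem set_underscores_spec : Claim_equal_set_underscores := by
  intro phrase init _
  show set_underscores phrase init = set_underscores_alt phrase init
  unfold set_underscores set_underscores_alt
  rw [pvJoin_empty_sep, pvFoldB init phrase.toList [] true, pvFoldA,
    show PySem.Chars.splitOn phrase.toList [' '] = pvSplit [] phrase.toList from by
      unfold PySem.Chars.splitOn
      rw [pvGo_spec _ _ _ _ (by omega)]; simp]
  simp only [List.nil_append]
  rw [pvKey]
  simp [pvWfmt_nil]
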